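-- pv_equiv track=rewrite | github.com/miliar/Code_Jam_Webscraper | solutions_python/Problem_185/465.py | min_y
-- ===== SOURCE A (Python) =====
-- def min_y(l):
--   miny = float('inf')
--   results = []
--   for x,y in l:
--     if y < miny:
--       results = []
--       miny = y
--     if y == miny:
--       results.append((x,y))
--   return results
-- ===== SOURCE B (Python) =====
-- def min_y(l):
--     miny = min((y for x, y in l), default=float('inf'))
--     return [(x, y) for x, y in l if y == miny]
-- ===== Notes on version B (the rewrite author's own statement) =====
-- stated objective: simpler
-- what changed: Replaces A's interleaved reset-and-collect scan with an aggregate-then-filter decomposition: compute the minimum y once, then keep the pairs whose y equals it.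
import Mathlib
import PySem

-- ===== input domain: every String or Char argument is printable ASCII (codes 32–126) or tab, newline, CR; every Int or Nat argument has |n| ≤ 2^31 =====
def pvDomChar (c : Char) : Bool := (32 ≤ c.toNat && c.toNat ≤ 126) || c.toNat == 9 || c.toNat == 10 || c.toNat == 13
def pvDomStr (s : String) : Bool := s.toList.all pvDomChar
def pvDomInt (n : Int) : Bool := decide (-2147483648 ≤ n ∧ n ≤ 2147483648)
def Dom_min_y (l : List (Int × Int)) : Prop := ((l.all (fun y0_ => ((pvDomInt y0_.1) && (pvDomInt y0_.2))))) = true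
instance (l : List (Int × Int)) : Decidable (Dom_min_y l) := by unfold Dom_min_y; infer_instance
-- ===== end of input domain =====

-- B is an aggregate-then-filter decomposition (min of y's, then filter); return value proved equal to A's on all inputs.

-- ===== PORT A =====
-- state: (miny, results); miny = none plays float('inf') (y < inf always true, y == inf never for an int)
def minYStep (st : Option Int × List (Int × Int)) (p : Int × Int) : Option Int × List (Int × Int) :=
  let st1 := if (match st.1 with | none => true | some m => decide (p.2 < m)) then (some p.2, ([] : List (Int × Int))) else st
  if st1.1 = some p.2 then (st1.1, st1.2 ++ [(p.1, p.2)]) else st1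

def min_y (l : List (Int × Int)) : List (Int × Int) :=
  (l.foldl minYStep (none, [])).2

-- ===== PORT B =====
def min_y_alt (l : List (Int × Int)) : List (Int × Int) :=
  match PySem.List.min? (l.map (fun p => p.2)) (fun y => y) with
  | none => []           -- min's default float('inf'): no y equals it, comprehension is empty
  | some m => l.filter (fun p => p.2 == m)

-- ===== PRECONDITION & SPEC =====
def Spec_min_y (l : List (Int × Int)) (out : List (Int × Int)) : Prop := out = min_y_alt l
instance (l : List (Int × Int)) (out : List (Int × Int)) : Decidable (Spec_min_y l out) := by unfold Spec_min_y; infer_instance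

-- ===== CLAIM (what is proved, stated in full; the proofs are below) =====
def Claim_equal_min_y : Prop := ∀ (l : List (Int × Int)), Dom_min_y l → Spec_min_y l (min_y l)

-- ===== LEMMAS AND PROOFS =====

theorem foldlMinLe (t : List Int) (x : Int) : t.foldl min x ≤ x := by
  induction t generalizing x with
  | nil => simp
  | cons a t ih => exact le_trans (ih _) (min_le_left _ _)

-- invariant for A's fold from a reached state (some m, acc):
-- the final min is k = fold of min over the rest; acc survives iff no strictly smaller y appears
theorem minY_fold_inv (l : List (Int × Int)) : ∀ (m : Int) (acc : List (Int × Int)),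
    (l.foldl minYStep (some m, acc)).2 =
      (if m ≤ (l.map (fun p => p.2)).foldl min m then acc else [])
        ++ l.filter (fun p => p.2 == (l.map (fun p => p.2)).foldl min m) := by
  induction l with
  | nil => intro m acc; simp
  | cons p t ih =>
    intro m acc
    by_cases h : p.2 < m
    · have hm : min m p.2 = p.2 := by omega
      simp only [List.foldl_cons, List.map_cons, minYStep, h, decide_true, if_true, hm]
      rw [ih p.2 ([] ++ [(p.1, p.2)])]
      have hk : (t.map (fun p => p.2)).foldl min p.2 ≤ p.2 := foldlMinLe _ _
      have : ¬ m ≤ (t.map (fun p => p.2)).foldl min p.2 := by omega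
      simp only [if_neg this, List.nil_append, List.filter_cons]
      by_cases he : p.2 = (t.map (fun p => p.2)).foldl min p.2
      · simp [← he]
      · have : ¬ p.2 ≤ (t.map (fun p => p.2)).foldl min p.2 := by omega
        simp [if_neg this, he]
    · have hm : min m p.2 = m := by omega
      have hk : (t.map (fun p => p.2)).foldl min m ≤ m := foldlMinLe _ _
      simp only [List.foldl_cons, List.map_cons, minYStep, decide_eq_true_eq, if_neg h, hm]
      by_cases he : p.2 = m
      · subst he
        rw [if_pos rfl]
        rw [ih p.2 (acc ++ [(p.1, p.2)])]
        simp only [List.filter_cons]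
        by_cases hle : p.2 ≤ (t.map (fun p => p.2)).foldl min p.2
        · have : (t.map (fun p => p.2)).foldl min p.2 = p.2 := by omega
          simp [this]
        · have hne : ¬ p.2 = (t.map (fun p => p.2)).foldl min p.2 := by omega
          simp [if_neg hle, hne]
      · have hne : ¬ (some m = some p.2) := by simp [Ne.symm he]
        rw [if_neg hne]
        rw [ih m acc]
        simp only [List.filter_cons]
        by_cases heq : p.2 = (t.map (fun p => p.2)).foldl min m
        · exfalso; omega
        · simp [heq]


-- ===== VERDICT (by name: the statement is the Claim_ definition above) =====
theorem min_y_spec : Claim_equal_min_y := by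
  intro l _
  unfold Spec_min_y min_y min_y_alt
  cases l with
  | nil => simp [PySem.List.min?]
  | cons p t =>
    rw [List.map_cons, PySem.List.min?_id_cons]
    simp only [List.foldl_cons, minYStep, if_true, List.nil_append]
    rw [minY_fold_inv]
    have hk : (t.map (fun p => p.2)).foldl min p.2 ≤ p.2 := foldlMinLe _ _
    simp only [List.filter_cons]
    by_cases hle : p.2 ≤ (t.map (fun p => p.2)).foldl min p.2
    · have : (t.map (fun p => p.2)).foldl min p.2 = p.2 := by omega
      simp [this]
    · have hne : ¬ (p.2 = (t.map (fun p => p.2)).foldl min p.2) := by omega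
      simp [if_neg hle, hne]
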